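-- pv_equiv track=rewrite | github.com/Ruben-F-Ramirez/CS50P | lecture2/homework/plates.py | check_num_end
-- ===== SOURCE A (Python) =====
-- def check_num_end(s: str) -> bool:
--     digit = False
--     for c in s:
--         if not digit and c == '0':
--             return False
--         if c.isdecimal():
--             digit = True
--         else:
--             digit = False
--     return digit
-- ===== SOURCE B (Python) =====
-- from itertools import groupby
--
--
-- def check_num_end(s: str) -> bool:
--     last_key = None
--     for key, grp in groupby(s, key=str.isdecimal):
--         if key and next(grp) == '0':
--             return False
--         last_key = key
--     return last_key is True
-- ===== Notes on version B (the rewrite author's own statement) =====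
-- stated objective: alternative
-- what changed: Replaces A's per-character carried digit flag and early return with an itertools.groupby partition into maximal decimal/non-decimal runs, rejecting any decimal run whose first character is zero and accepting iff the last run is decimal.
import Mathlib
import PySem

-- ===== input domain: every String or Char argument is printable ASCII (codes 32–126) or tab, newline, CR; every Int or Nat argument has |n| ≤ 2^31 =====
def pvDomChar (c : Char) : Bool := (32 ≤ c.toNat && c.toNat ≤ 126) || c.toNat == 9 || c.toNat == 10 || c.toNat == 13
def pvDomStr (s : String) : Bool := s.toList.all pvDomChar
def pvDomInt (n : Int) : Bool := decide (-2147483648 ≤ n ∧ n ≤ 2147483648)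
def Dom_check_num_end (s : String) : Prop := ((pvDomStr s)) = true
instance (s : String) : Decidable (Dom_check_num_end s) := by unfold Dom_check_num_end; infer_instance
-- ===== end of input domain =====

-- B replaces A's per-character carried digit flag with a groupby partition into maximal decimal/non-decimal runs (alternative decomposition).

-- ===== PORT A =====
-- c.isdecimal(): on the printable-ASCII domain this is exactly '0'..'9' (PySem.Chars.isdigit agrees there)
def pvIsDec (c : Char) : Bool := PySem.Chars.isdigit c

-- A's for-loop with early return, carrying the digit flag
def pvAGo : List Char → Bool → Bool
  | [], digit => digit
  | c :: rest, digit =>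
      if !digit && (c == '0') then false
      else pvAGo rest (pvIsDec c)

def check_num_end (s : String) : Bool := pvAGo s.toList false

-- ===== PORT B =====
-- groupby iteration: each step consumes one maximal run (head char + dropWhile of the same key),
-- rejects a decimal run starting with '0', and remembers the last run's key
def pvBGo (l : List Char) (last : Option Bool) : Bool :=
  match l with
  | [] => last == some true
  | c :: rest =>
      let key := pvIsDec c
      if key && (c == '0') then false
      else pvBGo (rest.dropWhile (fun d => pvIsDec d == key)) (some key)
termination_by l.length
decreasing_by
  simp only [List.length_cons]
  exact Nat.lt_succ_of_le (rest.length_dropWhile_le _)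

def check_num_end_alt (s : String) : Bool := pvBGo s.toList none

-- ===== PRECONDITION & SPEC =====
def Spec_check_num_end (s : String) (out : Bool) : Prop := out = check_num_end_alt s
instance (s : String) (out : Bool) : Decidable (Spec_check_num_end s out) := by unfold Spec_check_num_end; infer_instance

-- ===== CLAIM (what is proved, stated in full; the proofs are below) =====
def Claim_equal_check_num_end : Prop := ∀ (s : String), Dom_check_num_end s → Spec_check_num_end s (check_num_end s)

-- ===== LEMMAS AND PROOFS =====

-- A's loop walks through a run whose key equals its current flag without changing state
theorem pvAGo_dropWhile : ∀ (l : List Char) (k : Bool),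
    pvAGo l k = pvAGo (l.dropWhile (fun d => pvIsDec d == k)) k
  | [], _ => rfl
  | c :: rest, k => by
    by_cases h : pvIsDec c = k
    · have hz : (!k && (c == '0')) = false := by
        by_cases hc : c = '0'
        · subst hc
          have hk : k = true := by rw [← h]; decide
          simp [hk]
        · simp [hc]
      have l1 : pvAGo (c :: rest) k = pvAGo rest k := by
        simp [pvAGo, hz, h]
      have l2 : (c :: rest).dropWhile (fun d => pvIsDec d == k)
              = rest.dropWhile (fun d => pvIsDec d == k) := by
        simp [h]
      rw [l1, l2, ← pvAGo_dropWhile rest k]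
    · have l2 : (c :: rest).dropWhile (fun d => pvIsDec d == k) = c :: rest := by
        simp [h]
      rw [l2]

-- the head surviving a dropWhile fails the predicate
theorem pvHead_dropWhile_false (p : Char → Bool) :
    ∀ (l : List Char) (h : Char), (l.dropWhile p).head? = some h → p h = false
  | [], _ => by intro hh; cases hh
  | c :: rest, h => by
    intro hh
    by_cases hp : p c = true
    · rw [List.dropWhile_cons, if_pos hp] at hh
      exact pvHead_dropWhile_false p rest h hh
    · rw [List.dropWhile_cons, if_neg hp] at hh
      cases hh
      simpa using hp

-- main invariant: when the head of l starts a fresh run relative to k, the two loops agree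
theorem pvGo_eq (n : Nat) : ∀ (l : List Char), l.length ≤ n →
    ∀ (k : Option Bool), (∀ h, l.head? = some h → k ≠ some (pvIsDec h)) →
    pvBGo l k = pvAGo l (k == some true) := by
  induction n with
  | zero =>
    intro l hl k _
    have : l = [] := List.eq_nil_of_length_eq_zero (Nat.le_zero.1 hl)
    subst this
    simp [pvBGo, pvAGo]
  | succ m ih =>
    intro l hl k hk
    match l with
    | [] => simp [pvBGo, pvAGo]
    | c :: rest =>
      have hne := hk c rfl
      by_cases hc : c = '0'
      · subst hc
        have hd : pvIsDec '0' = true := by decide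
        have hkt : (k == some true) = false := by
          cases k with
          | none => rfl
          | some b =>
            cases b
            · rfl
            · exact absurd rfl (hd ▸ hne)
        simp [pvBGo, pvAGo, hd, hkt]
      · have hc' : (c == '0') = false := by simp [hc]
        have hB : pvBGo (c :: rest) k
            = pvBGo (rest.dropWhile (fun d => pvIsDec d == pvIsDec c)) (some (pvIsDec c)) := by
          simp [pvBGo, hc']
        have hA : pvAGo (c :: rest) (k == some true) = pvAGo rest (pvIsDec c) := by
          simp [pvAGo, hc']
        have hflag : (some (pvIsDec c) == some true) = pvIsDec c := by
          cases pvIsDec c <;> rfl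
        have hkey := ih (rest.dropWhile (fun d => pvIsDec d == pvIsDec c))
          (le_trans (rest.length_dropWhile_le _) (Nat.le_of_succ_le_succ hl))
          (some (pvIsDec c)) (by
            intro h hh
            have hf := pvHead_dropWhile_false _ rest h hh
            intro heq
            have : pvIsDec h = pvIsDec c := (Option.some_inj.mp heq).symm
            simp [this] at hf)
        rw [hB, hA, pvAGo_dropWhile rest (pvIsDec c), hkey, hflag]

-- ===== VERDICT =====
theorem check_num_end_spec : Claim_equal_check_num_end := by
  intro s _
  unfold Spec_check_num_end check_num_end check_num_end_alt
  rw [pvGo_eq s.toList.length s.toList le_rfl none ?_]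
  · rfl
  · intro h _ hcontra
    cases hcontra
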